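-- pv_equiv track=rewrite | github.com/Raptorpit/Dota2_Boost_Price_Bot | calculate.py | boost_price
-- ===== SOURCE A (Python) =====
-- def boost_price(price_dict, starting_mmr, ending_mmr):
--     price_dict = price_dict
--     starting_mmr = starting_mmr
--     ending_mmr = ending_mmr
--     summa = 0
--     while starting_mmr < ending_mmr:
--         for k, v in price_dict.items():
--             if starting_mmr in v:
--                 summa += k
--         starting_mmr += 100
--     return summa
-- ===== SOURCE B (Python) =====
-- def boost_price(price_dict, starting_mmr, ending_mmr):
--     total = 0
--     for k, v in price_dict.items():
--         for m in set(v):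
--             if starting_mmr <= m < ending_mmr and (m - starting_mmr) % 100 == 0:
--                 total += k
--     return total
-- ===== Notes on version B (the rewrite author's own statement) =====
-- stated objective: alternative
-- what changed: Instead of stepping through the MMR range 100 at a time and rescanning the whole dict at every step, B makes a single pass over the dict entries and, for each distinct value m, decides arithmetically whether m lies on the 100-step progression from starting_mmr; cost depends on the number of entries rather than on the range length.
import Mathlib
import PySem

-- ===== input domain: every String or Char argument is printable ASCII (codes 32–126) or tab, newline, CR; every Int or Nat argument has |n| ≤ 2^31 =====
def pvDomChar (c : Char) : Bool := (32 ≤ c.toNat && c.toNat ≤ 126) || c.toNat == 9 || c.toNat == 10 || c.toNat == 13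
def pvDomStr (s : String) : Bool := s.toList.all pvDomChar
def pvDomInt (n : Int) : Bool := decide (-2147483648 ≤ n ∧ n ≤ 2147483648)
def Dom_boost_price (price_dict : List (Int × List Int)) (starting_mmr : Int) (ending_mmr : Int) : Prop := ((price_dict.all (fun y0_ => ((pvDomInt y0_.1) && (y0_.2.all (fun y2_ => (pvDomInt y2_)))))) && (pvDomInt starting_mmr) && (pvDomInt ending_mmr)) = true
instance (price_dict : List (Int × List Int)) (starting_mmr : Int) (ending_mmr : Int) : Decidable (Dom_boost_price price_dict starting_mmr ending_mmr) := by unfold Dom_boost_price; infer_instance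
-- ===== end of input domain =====

-- ===== PORT A =====
-- faithful port of A: while-loop stepping starting_mmr by 100, inner for-loop over the dict summing keys whose value list contains the current mmr
def pvInnerA (price_dict : List (Int × List Int)) (s : Int) (summa : Int) : Int :=
  price_dict.foldl (fun summa kv => if kv.2.contains s then summa + kv.1 else summa) summa

def pvLoopA (price_dict : List (Int × List Int)) (s e : Int) (summa : Int) : Int :=
  if h : s < e then pvLoopA price_dict (s + 100) e (pvInnerA price_dict s summa) else summa
termination_by (e - s).toNat
decreasing_by omega

def boost_price (price_dict : List (Int × List Int)) (starting_mmr : Int) (ending_mmr : Int) : Int :=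
  pvLoopA price_dict starting_mmr ending_mmr 0

-- ===== PORT B =====
-- B: one pass over the entries; for each distinct value m, add k iff m lies on the
-- 100-step progression from starting_mmr (membership decided arithmetically)
def pvHit (k s e : Int) (dl : List Int) : Int :=
  dl.foldl (fun a m => if s ≤ m ∧ m < e ∧ PySem.Int.mod (m - s) 100 = 0 then a + k else a) 0

def boost_price_alt (price_dict : List (Int × List Int)) (starting_mmr : Int) (ending_mmr : Int) : Int :=
  price_dict.foldl
    (fun total kv => total + pvHit kv.1 starting_mmr ending_mmr (PySem.Set.ofList kv.2)) 0

-- ===== PRECONDITION & SPEC =====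
def Spec_boost_price (price_dict : List (Int × List Int)) (starting_mmr : Int) (ending_mmr : Int) (out : Int) : Prop := out = boost_price_alt price_dict starting_mmr ending_mmr
instance (price_dict : List (Int × List Int)) (starting_mmr : Int) (ending_mmr : Int) (out : Int) : Decidable (Spec_boost_price price_dict starting_mmr ending_mmr out) := by unfold Spec_boost_price; infer_instance

-- ===== CLAIM (what is proved, stated in full; the proofs are below) =====
def Claim_equal_boost_price : Prop := ∀ (price_dict : List (Int × List Int)) (starting_mmr : Int) (ending_mmr : Int), Dom_boost_price price_dict starting_mmr ending_mmr → Spec_boost_price price_dict starting_mmr ending_mmr (boost_price price_dict starting_mmr ending_mmr)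

-- ===== LEMMAS AND PROOFS =====

lemma sum_map_add {A : Type} (f g : A -> Int) (l : List A) :
    (l.map (fun x => f x + g x)).sum = (l.map f).sum + (l.map g).sum := by
  induction l with
  | nil => simp
  | cons x tl ih => simp only [List.map_cons, List.sum_cons, ih]; ring

lemma sum_map_zero {A : Type} (f : A -> Int) (l : List A) (h : ∀ x ∈ l, f x = 0) :
    (l.map f).sum = 0 := by
  apply List.sum_eq_zero
  intro y hy
  rcases List.mem_map.mp hy with ⟨x, hx, rfl⟩
  exact h x hx

-- B's inner fold as a mapped sum (with the Python '%' rewritten to emod: divisor 100 > 0)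
lemma pvHit_eq_sum (k s e : Int) (dl : List Int) :
    pvHit k s e dl
      = (dl.map (fun m => if s ≤ m ∧ m < e ∧ (m - s) % 100 = 0 then k else 0)).sum := by
  unfold pvHit
  rw [PySem.List.foldl_congr_mem
        (g := fun a m => a + (if s ≤ m ∧ m < e ∧ (m - s) % 100 = 0 then k else 0))]
  · rw [PySem.List.foldl_add, zero_add]
  · intro a m _
    rw [PySem.Int.mod_eq_emod_of_pos (by norm_num)]
    split_ifs <;> simp

-- A's inner fold as a mapped sum
lemma pvInnerA_eq_sum (pd : List (Int × List Int)) (s acc : Int) :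
    pvInnerA pd s acc
      = acc + (pd.map (fun kv => if kv.2.contains s then kv.1 else 0)).sum := by
  unfold pvInnerA
  rw [PySem.List.foldl_congr_mem
        (g := fun a kv => a + (if kv.2.contains s then kv.1 else 0))]
  · rw [PySem.List.foldl_add]
  · intro a kv _; split_ifs <;> simp

lemma alt_eq_sum (pd : List (Int × List Int)) (s e : Int) :
    boost_price_alt pd s e
      = (pd.map (fun kv => pvHit kv.1 s e (PySem.Set.ofList kv.2))).sum := by
  unfold boost_price_alt
  rw [PySem.List.foldl_add, zero_add]

lemma sum_indicator (dl : List Int) (h : dl.Nodup) (s k : Int) :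
    (dl.map (fun m => if m = s then k else 0)).sum = if s ∈ dl then k else 0 := by
  induction dl with
  | nil => simp
  | cons x tl ih =>
    rcases List.nodup_cons.mp h with ⟨hx, htl⟩
    by_cases hxs : x = s
    · subst hxs
      have hz : (tl.map (fun m => if m = x then k else 0)).sum = 0 := by
        apply sum_map_zero
        intro m hm
        have : m ≠ x := fun he => hx (he ▸ hm)
        simp [this]
      simp [hz, hx]
    · have hsx : s ≠ x := fun he => hxs he.symm
      simp [hxs, hsx, ih htl]

-- one step of the progression, per entry: peel off the contribution of m = s
lemma pvHit_step (k s e : Int) (dl : List Int) (hnd : dl.Nodup) (hse : s < e) :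
    pvHit k s e dl = (if dl.contains s then k else 0) + pvHit k (s + 100) e dl := by
  rw [pvHit_eq_sum, pvHit_eq_sum]
  have hpt : ∀ m : Int,
      (if s ≤ m ∧ m < e ∧ (m - s) % 100 = 0 then k else 0)
        = (if m = s then k else 0)
          + (if s + 100 ≤ m ∧ m < e ∧ (m - (s + 100)) % 100 = 0 then k else 0) := by
    intro m
    by_cases hm : m = s
    · subst hm; simp [hse]
    · have : (s ≤ m ∧ m < e ∧ (m - s) % 100 = 0)
          ↔ (s + 100 ≤ m ∧ m < e ∧ (m - (s + 100)) % 100 = 0) := by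
        constructor <;> (rintro ⟨h1, h2, h3⟩; refine ⟨by omega, h2, by omega⟩)
      simp only [this, hm, if_false, zero_add]
  calc (dl.map (fun m => if s ≤ m ∧ m < e ∧ (m - s) % 100 = 0 then k else 0)).sum
      = (dl.map (fun m => (if m = s then k else 0)
          + (if s + 100 ≤ m ∧ m < e ∧ (m - (s + 100)) % 100 = 0 then k else 0))).sum := by
        exact congrArg List.sum (List.map_congr_left (fun m _ => hpt m))
    _ = (dl.map (fun m => if m = s then k else 0)).sum
          + (dl.map (fun m => if s + 100 ≤ m ∧ m < e ∧ (m - (s + 100)) % 100 = 0 then k else 0)).sum :=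
        sum_map_add _ _ dl
    _ = _ := by
        rw [sum_indicator dl hnd s k]
        by_cases hmem : s ∈ dl <;> simp [hmem]

-- one step of the progression, lifted to the whole dict
lemma alt_step (pd : List (Int × List Int)) (s e : Int) (hse : s < e) :
    boost_price_alt pd s e
      = (pd.map (fun kv => if kv.2.contains s then kv.1 else 0)).sum
          + boost_price_alt pd (s + 100) e := by
  rw [alt_eq_sum, alt_eq_sum]
  induction pd with
  | nil => simp
  | cons kv tl ih =>
    simp only [List.map_cons, List.sum_cons, ih]
    rw [pvHit_step kv.1 s e (PySem.Set.ofList kv.2) (PySem.Set.nodup_ofList kv.2) hse]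
    simp only [List.contains_iff_mem, PySem.Set.mem_ofList]
    ring

lemma alt_empty (pd : List (Int × List Int)) (s e : Int) (h : ¬ s < e) :
    boost_price_alt pd s e = 0 := by
  rw [alt_eq_sum]
  apply sum_map_zero
  intro kv _
  rw [pvHit_eq_sum]
  apply sum_map_zero
  intro m _
  have : ¬ (s ≤ m ∧ m < e ∧ (m - s) % 100 = 0) := by rintro ⟨h1, h2, _⟩; omega
  rw [if_neg this]

lemma loopA_eq (pd : List (Int × List Int)) (e : Int) :
    ∀ (n : Nat) (s acc : Int), (e - s).toNat = n →
      pvLoopA pd s e acc = acc + boost_price_alt pd s e := by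
  intro n
  induction n using Nat.strong_induction_on with
  | _ n ih =>
    intro s acc hn
    rw [pvLoopA]
    by_cases hse : s < e
    · rw [dif_pos hse]
      rw [ih ((e - (s + 100)).toNat) (by omega) (s + 100) _ rfl]
      rw [pvInnerA_eq_sum, alt_step pd s e hse]
      ring
    · rw [dif_neg hse, alt_empty pd s e hse]
      ring

-- ===== VERDICT (by name: the statement is the Claim_ definition above) =====
theorem boost_price_spec : Claim_equal_boost_price := by
  intro pd s e _
  unfold Spec_boost_price boost_price
  rw [loopA_eq pd e ((e - s).toNat) s 0 rfl]
  ring
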